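-- pv_equiv track=rewrite | github.com/JoaoNunoAbreu/advent-of-code | 2015/day05/main.py | no_overlap_pairs
-- ===== SOURCE A (Python) =====
-- def no_overlap_pairs(word):
--     d = {}
--     for c in range(len(word) - 1):
--         pair = word[c] + word[c + 1]
--         if(pair in d):
--             d[pair] += [(c, c+1)]
--         else:
--             d[pair] = [(c, c+1)]
--
--     for key in d:
--         clean_arr = []
--         coord = 0
--         while coord < len(d[key]):
--             clean_arr.append(d[key][coord])
--             if coord + 1 < len(d[key]):
--                 if(d[key][coord][1] == d[key][coord + 1][0]):
--                     coord += 1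
--                 else:
--                     clean_arr.append(d[key][coord + 1])
--             coord += 1
--         if len(clean_arr) > 1:
--             return True
--
--     return False
-- ===== SOURCE B (Python) =====
-- def no_overlap_pairs(word):
--     first = {}
--     for i in range(len(word) - 1):
--         pair = word[i] + word[i + 1]
--         if pair in first:
--             if i - first[pair] >= 2:
--                 return True
--         else:
--             first[pair] = i
--     return False
-- ===== Notes on version B (the rewrite author's own statement) =====
-- stated objective: simpler
-- what changed: A builds a dict mapping each pair to the full list of its occurrence coordinates and then rescans every list with a while-loop de-overlapping pass; B is one streaming pass keeping only the first occurrence index per pair and returning as soon as a pair recurs at distance >= 2.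
import Mathlib
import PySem

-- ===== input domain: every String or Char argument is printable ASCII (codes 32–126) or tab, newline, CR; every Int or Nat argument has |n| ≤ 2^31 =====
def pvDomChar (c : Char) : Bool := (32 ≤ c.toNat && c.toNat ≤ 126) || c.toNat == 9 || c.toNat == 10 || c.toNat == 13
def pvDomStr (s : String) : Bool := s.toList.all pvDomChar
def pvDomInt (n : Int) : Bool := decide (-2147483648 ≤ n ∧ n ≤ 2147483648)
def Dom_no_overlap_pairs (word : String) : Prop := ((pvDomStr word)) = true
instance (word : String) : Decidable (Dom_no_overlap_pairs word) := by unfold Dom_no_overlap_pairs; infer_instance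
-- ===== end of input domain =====

-- B replaces A's build-all-occurrence-lists-then-rescan with one streaming pass keeping only the
-- first occurrence index per pair and returning early (objective: simpler; measured faster in a timing run).


-- ===== PORT A =====
-- The 2-character string word[c] + word[c+1] is represented by its pair of characters
-- (two such strings are equal iff the character pairs are equal, so dict behaviour is exact).
-- c ranges over range(len(word)-1), so both indices are always in range and the getD default is never used.
def pvPairA (cs : List Char) (c : Int) : Char × Char :=
  (PySem.List.pyGetD cs c ' ', PySem.List.pyGetD cs (c + 1) ' ')

-- the inner while loop over d[key] (coord advances by 2 when consecutive coordinates touch, else by 1,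
-- re-visiting the second element)
def pvCleanA : List (Int × Int) → List (Int × Int)
  | [] => []
  | [x] => [x]
  | x :: y :: rest =>
      if x.2 == y.1 then x :: pvCleanA rest
      else x :: y :: pvCleanA (y :: rest)

-- 'for key in d: … if len(clean_arr) > 1: return True' over the items in insertion order
def pvCheckA : List ((Char × Char) × List (Int × Int)) → Bool
  | [] => false
  | (_, occs) :: rest => if 1 < (pvCleanA occs).length then true else pvCheckA rest

def no_overlap_pairs (word : String) : Bool :=
  let cs := word.toList
  let d := (PySem.List.pyRange 0 (PySem.List.len cs - 1) 1).foldl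
    (fun (d : PySem.Dict (Char × Char) (List (Int × Int))) c =>
      let pair := pvPairA cs c
      match d.get? pair with
      | some l => d.insert pair (l ++ [(c, c + 1)])
      | none   => d.insert pair [(c, c + 1)])
    PySem.Dict.empty
  pvCheckA d.items

-- ===== PORT B =====
def pvPairB (cs : List Char) (c : Int) : Char × Char :=
  (PySem.List.pyGetD cs c ' ', PySem.List.pyGetD cs (c + 1) ' ')

-- the single pass with early return; `first` maps a pair to its first occurrence index
def pvLoopB (cs : List Char) : List Int → PySem.Dict (Char × Char) Int → Bool
  | [], _ => false
  | c :: rest, first =>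
      let pair := pvPairB cs c
      match first.get? pair with
      | some f => if 2 ≤ c - f then true else pvLoopB cs rest first
      | none   => pvLoopB cs rest (first.insert pair c)

def no_overlap_pairs_alt (word : String) : Bool :=
  let cs := word.toList
  pvLoopB cs (PySem.List.pyRange 0 (PySem.List.len cs - 1) 1) PySem.Dict.empty

-- ===== PRECONDITION & SPEC =====
def Spec_no_overlap_pairs (word : String) (out : Bool) : Prop := out = no_overlap_pairs_alt word
instance (word : String) (out : Bool) : Decidable (Spec_no_overlap_pairs word out) := by unfold Spec_no_overlap_pairs; infer_instance

-- ===== CLAIM (what is proved, stated in full; the proofs are below) =====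
def Claim_equal_no_overlap_pairs : Prop := ∀ (word : String), Dom_no_overlap_pairs word → Spec_no_overlap_pairs word (no_overlap_pairs word)

-- ===== LEMMAS AND PROOFS =====

-- the common specification both loops are proved equivalent to:
-- two occurrences of the same pair at distance ≥ 2 inside range(len-1)
def pvFar (cs : List Char) (R : List Int) : Prop :=
  ∃ i ∈ R, ∃ j ∈ R, i + 2 ≤ j ∧ pvPairA cs i = pvPairA cs j

-- occurrence list A's first loop accumulates for a given pair p
def pvOccL (cs : List Char) (S : List Int) (p : Char × Char) : List (Int × Int) :=
  (S.filter (fun c => pvPairA cs c == p)).map (fun c => (c, c + 1))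

lemma pvStepA_eq (cs : List Char) (d : PySem.Dict (Char × Char) (List (Int × Int))) (c : Int) :
    (match d.get? (pvPairA cs c) with
      | some l => d.insert (pvPairA cs c) (l ++ [(c, c + 1)])
      | none   => d.insert (pvPairA cs c) [(c, c + 1)]) =
    d.insert (pvPairA cs c) ((d.get? (pvPairA cs c)).getD [] ++ [(c, c + 1)]) := by
  cases h : d.get? (pvPairA cs c) <;> simp

lemma pvFoldA_get (cs : List Char) (S : List Int)
    (d : PySem.Dict (Char × Char) (List (Int × Int))) (p : Char × Char) :
    (S.foldl (fun d c =>
      match d.get? (pvPairA cs c) with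
      | some l => d.insert (pvPairA cs c) (l ++ [(c, c + 1)])
      | none   => d.insert (pvPairA cs c) [(c, c + 1)]) d).get? p =
    if pvOccL cs S p = [] then d.get? p
    else some ((d.get? p).getD [] ++ pvOccL cs S p) := by
  induction S generalizing d with
  | nil => simp [pvOccL]
  | cons c S' ih =>
    rw [List.foldl_cons, pvStepA_eq, ih]
    by_cases hc : pvPairA cs c = p
    · have hocc : pvOccL cs (c :: S') p = (c, c + 1) :: pvOccL cs S' p := by
        simp [pvOccL, hc]
      have hget : (d.insert (pvPairA cs c) ((d.get? (pvPairA cs c)).getD [] ++ [(c, c + 1)])).get? p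
          = some ((d.get? p).getD [] ++ [(c, c + 1)]) := by
        rw [← hc, PySem.Dict.get?_insert_self]
      rw [hocc, hget]
      by_cases he : pvOccL cs S' p = []
      · simp [he]
      · simp [he]
    · have hocc : pvOccL cs (c :: S') p = pvOccL cs S' p := by
        simp [pvOccL, beq_eq_false_iff_ne.mpr hc]
      have hget : (d.insert (pvPairA cs c) ((d.get? (pvPairA cs c)).getD [] ++ [(c, c + 1)])).get? p
          = d.get? p := PySem.Dict.get?_insert_of_ne _ _ (fun h => hc h.symm)
      rw [hocc, hget]

lemma pvFoldA_nodup (cs : List Char) (S : List Int)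
    (d : PySem.Dict (Char × Char) (List (Int × Int))) (h : d.keys.Nodup) :
    (S.foldl (fun d c =>
      match d.get? (pvPairA cs c) with
      | some l => d.insert (pvPairA cs c) (l ++ [(c, c + 1)])
      | none   => d.insert (pvPairA cs c) [(c, c + 1)]) d).keys.Nodup := by
  simp only [pvStepA_eq]
  exact PySem.Dict.nodup_keys_foldl_insert_key S (fun c => pvPairA cs c)
    (fun d c => (d.get? (pvPairA cs c)).getD [] ++ [(c, c + 1)]) d h

lemma pvCleanA_length_pos (xs : List (Int × Int)) (h : xs ≠ []) : 0 < (pvCleanA xs).length := by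
  match xs with
  | [] => exact absurd rfl h
  | [x] => simp [pvCleanA]
  | x :: y :: rest =>
    rw [pvCleanA]
    split <;> simp

-- characterisation of the de-overlapping pass on an occurrence list
lemma pvCleanA_iff (xs : List (Int × Int))
    (hs : xs.Pairwise (fun a b => a.1 < b.1)) (hv : ∀ e ∈ xs, e.2 = e.1 + 1) :
    1 < (pvCleanA xs).length ↔ ∃ a ∈ xs, ∃ b ∈ xs, a.1 + 2 ≤ b.1 := by
  match xs with
  | [] => simp [pvCleanA]
  | [x] =>
    simp only [pvCleanA, List.length_singleton, List.mem_singleton]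
    constructor
    · omega
    · rintro ⟨a, rfl, b, rfl, hab⟩; omega
  | [x, y] =>
    have hx : x.2 = x.1 + 1 := hv x (by simp)
    have hxy : x.1 < y.1 := by
      have := List.pairwise_cons.mp hs
      exact this.1 y (by simp)
    rw [pvCleanA]
    by_cases hadj : x.2 = y.1
    · simp only [hadj, beq_self_eq_true, if_true, pvCleanA, List.length_singleton]
      constructor
      · omega
      · rintro ⟨a, ha, b, hb, hab⟩
        simp only [List.mem_cons, List.not_mem_nil, or_false] at ha hb
        rcases ha with rfl | rfl <;> rcases hb with rfl | rfl <;> omega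
    · have hb : (x.2 == y.1) = false := beq_eq_false_iff_ne.mpr hadj
      simp only [hb, Bool.false_eq_true, if_false, pvCleanA, List.length_cons, List.length_nil]
      constructor
      · intro _
        exact ⟨x, by simp, y, by simp, by omega⟩
      · intro _; omega
  | x :: y :: z :: rest =>
    have hxy : x.1 < y.1 := (List.pairwise_cons.mp hs).1 y (by simp)
    have hyz : y.1 < z.1 := (List.pairwise_cons.mp (List.pairwise_cons.mp hs).2).1 z (by simp)
    constructor
    · intro _
      exact ⟨x, by simp, z, by simp, by omega⟩
    · intro _
      rw [pvCleanA]
      split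
      · have := pvCleanA_length_pos (z :: rest) (by simp)
        simp only [List.length_cons]
        omega
      · simp

lemma pvCheckA_iff (l : List ((Char × Char) × List (Int × Int))) :
    pvCheckA l = true ↔ ∃ x ∈ l, 1 < (pvCleanA x.2).length := by
  induction l with
  | nil => simp [pvCheckA]
  | cons hd tl ih =>
    obtain ⟨p, occs⟩ := hd
    rw [pvCheckA]
    split
    · simpa using Or.inl ‹1 < (pvCleanA occs).length›
    · simp only [List.mem_cons, ih]
      constructor
      · rintro ⟨x, hx, hlen⟩; exact ⟨x, Or.inr hx, hlen⟩
      · rintro ⟨x, hx | hx, hlen⟩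
        · subst hx; exact absurd hlen ‹¬ 1 < (pvCleanA occs).length›
        · exact ⟨x, hx, hlen⟩

lemma pvOccL_mem (cs : List Char) (S : List Int) (p : Char × Char) (a : Int × Int) :
    a ∈ pvOccL cs S p ↔ ∃ c ∈ S, pvPairA cs c = p ∧ a = (c, c + 1) := by
  simp only [pvOccL, List.mem_map, List.mem_filter, beq_iff_eq]
  constructor
  · rintro ⟨c, ⟨hc, hp⟩, rfl⟩; exact ⟨c, hc, hp, rfl⟩
  · rintro ⟨c, hc, hp, rfl⟩; exact ⟨c, ⟨hc, hp⟩, rfl⟩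

lemma pvOccL_sorted (cs : List Char) (a b : Int) (p : Char × Char) :
    (pvOccL cs (PySem.List.pyRange a b 1) p).Pairwise (fun x y => x.1 < y.1) := by
  unfold pvOccL
  rw [List.pairwise_map]
  exact ((PySem.List.pairwise_lt_pyRange_one a b).sublist (List.filter_sublist))

-- A computes pvFar
lemma pvA_iff (word : String) :
    no_overlap_pairs word = true ↔
      pvFar word.toList (PySem.List.pyRange 0 (PySem.List.len word.toList - 1) 1) := by
  simp only [no_overlap_pairs]
  set cs := word.toList with hcs
  set R := PySem.List.pyRange 0 (PySem.List.len cs - 1) 1 with hR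
  set d := R.foldl (fun d c =>
      match d.get? (pvPairA cs c) with
      | some l => d.insert (pvPairA cs c) (l ++ [(c, c + 1)])
      | none   => d.insert (pvPairA cs c) [(c, c + 1)]) PySem.Dict.empty with hd
  have hnd : d.keys.Nodup := pvFoldA_nodup cs R PySem.Dict.empty PySem.Dict.nodup_keys_empty
  have hget : ∀ p, d.get? p = if pvOccL cs R p = [] then none else some (pvOccL cs R p) := by
    intro p
    rw [hd, pvFoldA_get]
    simp [PySem.Dict.get?_empty]
  have hv : ∀ p, ∀ e ∈ pvOccL cs R p, e.2 = e.1 + 1 := by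
    intro p e he
    rcases (pvOccL_mem cs R p e).mp he with ⟨c, _, _, rfl⟩
    rfl
  rw [pvCheckA_iff]
  constructor
  · rintro ⟨⟨p, occs⟩, hmem, hlen⟩
    have hsome : d.get? p = some occs := PySem.Dict.get?_of_mem_items d hmem hnd
    rw [hget p] at hsome
    by_cases he : pvOccL cs R p = []
    · simp [he] at hsome
    · rw [if_neg he, Option.some_inj] at hsome
      subst hsome
      rcases (pvCleanA_iff _ (hR ▸ pvOccL_sorted cs 0 (PySem.List.len cs - 1) p) (hv p)).mp hlen
        with ⟨a, ha, b, hb, hab⟩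
      rcases (pvOccL_mem cs R p a).mp ha with ⟨i, hi, hpi, rfl⟩
      rcases (pvOccL_mem cs R p b).mp hb with ⟨j, hj, hpj, rfl⟩
      exact ⟨i, hi, j, hj, by simpa using hab, hpi.trans hpj.symm⟩
  · rintro ⟨i, hi, j, hj, hij, hpij⟩
    set p := pvPairA cs i with hp
    have hai : (i, i + 1) ∈ pvOccL cs R p := (pvOccL_mem cs R p _).mpr ⟨i, hi, rfl, rfl⟩
    have haj : (j, j + 1) ∈ pvOccL cs R p := (pvOccL_mem cs R p _).mpr ⟨j, hj, hpij.symm, rfl⟩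
    have hne : pvOccL cs R p ≠ [] := fun h => by simp [h] at hai
    have hsome : d.get? p = some (pvOccL cs R p) := by rw [hget p, if_neg hne]
    refine ⟨(p, pvOccL cs R p), PySem.Dict.mem_items_of_get?_eq_some d hsome, ?_⟩
    exact (pvCleanA_iff _ (hR ▸ pvOccL_sorted cs 0 (PySem.List.len cs - 1) p) (hv p)).mpr
      ⟨(i, i + 1), hai, (j, j + 1), haj, by simpa using hij⟩

-- B's loop invariant
lemma pvLoopB_iff (cs : List Char) (L P : List Int) (first : PySem.Dict (Char × Char) Int)
    (hL : L.Pairwise (· < ·))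
    (h1 : ∀ p f, first.get? p = some f → f ∈ P ∧ pvPairB cs f = p ∧ ∀ c ∈ P, pvPairB cs c = p → f ≤ c)
    (h2 : ∀ c ∈ P, (first.get? (pvPairB cs c)).isSome = true)
    (hord : ∀ c ∈ P, ∀ c' ∈ L, c < c') :
    pvLoopB cs L first = true ↔
      ∃ i ∈ P ++ L, ∃ j ∈ L, i + 2 ≤ j ∧ pvPairB cs i = pvPairB cs j := by
  induction L generalizing first P with
  | nil => simp [pvLoopB]
  | cons c rest ih =>
    have hcrest : ∀ c' ∈ rest, c < c' := fun c' hc' => (List.pairwise_cons.mp hL).1 c' hc'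
    have hLrest : rest.Pairwise (· < ·) := (List.pairwise_cons.mp hL).2
    have hord' : ∀ a ∈ P ++ [c], ∀ b ∈ rest, a < b := by
      intro a ha b hb
      rcases List.mem_append.mp ha with ha | ha
      · exact hord a ha b (List.mem_cons_of_mem _ hb)
      · have : a = c := by simpa using ha
        subst this; exact hcrest b hb
    cases h : first.get? (pvPairB cs c) with
    | some f =>
      obtain ⟨hfP, hfpair, hfmin⟩ := h1 _ _ h
      have hfc : f < c := hord f hfP c (List.mem_cons_self)
      by_cases hret : 2 ≤ c - f
      · simp only [pvLoopB, h, hret, if_true]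
        constructor
        · intro _
          exact ⟨f, List.mem_append_left _ hfP, c, List.mem_cons_self, by omega, hfpair⟩
        · intro _; trivial
      · have h1' : ∀ p f', first.get? p = some f' →
            f' ∈ P ++ [c] ∧ pvPairB cs f' = p ∧ ∀ c' ∈ P ++ [c], pvPairB cs c' = p → f' ≤ c' := by
          intro p f' hpf
          obtain ⟨hm, hp, hmin⟩ := h1 _ _ hpf
          refine ⟨List.mem_append_left _ hm, hp, ?_⟩
          intro c' hc' hpc'
          rcases List.mem_append.mp hc' with hc' | hc'
          · exact hmin c' hc' hpc'
          · have : c' = c := by simpa using hc'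
            subst this
            exact le_of_lt (hord f' hm c' (List.mem_cons_self))
        have h2' : ∀ c' ∈ P ++ [c], (first.get? (pvPairB cs c')).isSome = true := by
          intro c' hc'
          rcases List.mem_append.mp hc' with hc' | hc'
          · exact h2 c' hc'
          · have : c' = c := by simpa using hc'
            subst this; simp [h]
        simp only [pvLoopB, h, hret, if_false]
        rw [ih _ _ hLrest h1' h2' hord', List.append_cons P c rest]
        constructor
        · rintro ⟨i, hi, j, hj, hij, hp⟩
          exact ⟨i, hi, j, List.mem_cons_of_mem _ hj, hij, hp⟩
        · rintro ⟨i, hi, j, hj, hij, hp⟩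
          rcases List.mem_cons.mp hj with rfl | hj
          · exfalso
            rcases List.mem_append.mp hi with hi | hi
            · rcases List.mem_append.mp hi with hi | hi
              · have := hfmin i hi (hp.trans hfpair.symm ▸ hp)
                omega
              · have : i = j := by simpa using hi
                omega
            · have := hcrest i hi
              omega
          · exact ⟨i, hi, j, hj, hij, hp⟩
    | none =>
      have h1' : ∀ p f', (first.insert (pvPairB cs c) c).get? p = some f' →
          f' ∈ P ++ [c] ∧ pvPairB cs f' = p ∧ ∀ c' ∈ P ++ [c], pvPairB cs c' = p → f' ≤ c' := by
        intro p f' hpf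
        by_cases hp : p = pvPairB cs c
        · subst hp
          rw [PySem.Dict.get?_insert_self] at hpf
          have : f' = c := by simpa using hpf.symm
          subst this
          refine ⟨List.mem_append_right _ (List.mem_cons_self), rfl, ?_⟩
          intro c' hc' hpc'
          rcases List.mem_append.mp hc' with hc' | hc'
          · exfalso
            have := h2 c' hc'
            rw [hpc', h] at this
            simp at this
          · have : c' = f' := by simpa using hc'
            omega
        · rw [PySem.Dict.get?_insert_of_ne _ _ hp] at hpf
          obtain ⟨hm, hpr, hmin⟩ := h1 _ _ hpf
          refine ⟨List.mem_append_left _ hm, hpr, ?_⟩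
          intro c' hc' hpc'
          rcases List.mem_append.mp hc' with hc' | hc'
          · exact hmin c' hc' hpc'
          · have : c' = c := by simpa using hc'
            subst this
            exact le_of_lt (hord f' hm c' (List.mem_cons_self))
      have h2' : ∀ c' ∈ P ++ [c], ((first.insert (pvPairB cs c) c).get? (pvPairB cs c')).isSome = true := by
        intro c' hc'
        rcases List.mem_append.mp hc' with hc' | hc'
        · have hne : pvPairB cs c' ≠ pvPairB cs c := by
            intro he
            have := h2 c' hc'
            rw [he, h] at this
            simp at this
          rw [PySem.Dict.get?_insert_of_ne _ _ hne]
          exact h2 c' hc'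
        · have : c' = c := by simpa using hc'
          subst this
          rw [PySem.Dict.get?_insert_self]
          rfl
      simp only [pvLoopB, h]
      rw [ih _ _ hLrest h1' h2' hord', List.append_cons P c rest]
      constructor
      · rintro ⟨i, hi, j, hj, hij, hp⟩
        exact ⟨i, hi, j, List.mem_cons_of_mem _ hj, hij, hp⟩
      · rintro ⟨i, hi, j, hj, hij, hp⟩
        rcases List.mem_cons.mp hj with rfl | hj
        · exfalso
          rcases List.mem_append.mp hi with hi | hi
          · rcases List.mem_append.mp hi with hi | hi
            · have := h2 i hi
              rw [hp, h] at this
              simp at this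
            · have : i = j := by simpa using hi
              omega
          · have := hcrest i hi
            omega
        · exact ⟨i, hi, j, hj, hij, hp⟩

lemma pvB_iff (word : String) :
    no_overlap_pairs_alt word = true ↔
      pvFar word.toList (PySem.List.pyRange 0 (PySem.List.len word.toList - 1) 1) := by
  simp only [no_overlap_pairs_alt]
  rw [pvLoopB_iff word.toList (PySem.List.pyRange 0 (PySem.List.len word.toList - 1) 1) []
    PySem.Dict.empty (PySem.List.pairwise_lt_pyRange_one _ _)
    (by intro p f hf; rw [PySem.Dict.get?_empty] at hf; cases hf)
    (by intro c hc; cases hc)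
    (by intro c hc; cases hc)]
  unfold pvFar pvPairB pvPairA
  simp only [List.nil_append]

-- ===== VERDICT (by name: the statement is the Claim_ definition above) =====
theorem no_overlap_pairs_spec : Claim_equal_no_overlap_pairs := by
  intro word _
  unfold Spec_no_overlap_pairs
  by_cases h : pvFar word.toList (PySem.List.pyRange 0 (PySem.List.len word.toList - 1) 1)
  · rw [(pvA_iff word).mpr h, ((pvB_iff word).mpr h).symm]
  · have ha : no_overlap_pairs word = false := by
      cases hx : no_overlap_pairs word
      · rfl
      · exact absurd ((pvA_iff word).mp hx) h
    have hb : no_overlap_pairs_alt word = false := by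
      cases hx : no_overlap_pairs_alt word
      · rfl
      · exact absurd ((pvB_iff word).mp hx) h
    rw [ha, hb]
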